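-- pv_equiv track=rewrite | github.com/HIROMU1015/Evaluation_numGate_highorder_DF | src/trotterlib/grouping_rz_layers.py | greedy_layering
-- ===== SOURCE A (Python) =====
-- from typing import Dict, FrozenSet, List, Mapping, Sequence, Tuple
--
-- def greedy_layering(
--     supports: Sequence[FrozenSet[int]],
-- ) -> List[List[FrozenSet[int]]]:
--     """Disjoint support を同一レイヤーに詰める greedy 彩色。"""
--     layers: List[List[FrozenSet[int]]] = []
--     used_sets: List[set[int]] = []
--     for supp in supports:
--         placed = False
--         for idx, used in enumerate(used_sets):
--             if used.intersection(supp):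
--                 continue
--             layers[idx].append(supp)
--             used.update(supp)
--             placed = True
--             break
--         if not placed:
--             layers.append([supp])
--             used_sets.append(set(supp))
--     return layers
-- ===== SOURCE B (Python) =====
-- def greedy_layering(supports):
--     """First-fit layering via a per-element index map instead of scanning layers."""
--     layers = []
--     elem_layers = {}  # element -> set of layer indices containing it
--     for supp in supports:
--         blocked = set()
--         for e in supp:
--             blocked |= elem_layers.get(e, set())
--         idx = next(i for i in range(len(layers) + 1) if i not in blocked)
--         if idx == len(layers):
--             layers.append([supp])
--         else:
--             layers[idx].append(supp)
--         for e in supp: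
--             elem_layers[e] = elem_layers.get(e, set()) | {idx}
--     return layers
-- ===== Notes on version B (the rewrite author's own statement) =====
-- stated objective: faster
-- what changed: Replaces A's scan over existing layers with per-layer element sets (one set-intersection test per layer per support) by a dict mapping each element to the set of layer indices containing it; the first-fit index is the smallest index not blocked by any element of the support, so no pass over the layers is needed.
import Mathlib
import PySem

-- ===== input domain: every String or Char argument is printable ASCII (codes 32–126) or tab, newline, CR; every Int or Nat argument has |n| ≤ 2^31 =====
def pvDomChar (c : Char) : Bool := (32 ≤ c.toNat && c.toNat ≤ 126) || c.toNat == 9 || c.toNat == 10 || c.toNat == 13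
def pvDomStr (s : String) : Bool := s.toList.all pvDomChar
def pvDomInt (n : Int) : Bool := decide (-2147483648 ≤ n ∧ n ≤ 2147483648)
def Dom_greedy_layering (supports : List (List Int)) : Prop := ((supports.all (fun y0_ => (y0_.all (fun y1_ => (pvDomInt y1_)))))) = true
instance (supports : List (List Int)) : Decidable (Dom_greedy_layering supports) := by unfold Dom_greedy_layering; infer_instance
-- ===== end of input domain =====

-- B replaces A's scan over layers (testing set intersections) by a per-element map from
-- element to the set of layer indices containing it; the first-fit index is the smallest
-- index not blocked by any element of the support. Same return value; objective: alternative.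

-- ===== PORT A =====
-- inner 'for idx, used in enumerate(used_sets): … break' with the trailing 'if not placed' append
def placeA (supp : List Int) : List (List (List Int)) → List (PySem.Set Int) →
    List (List (List Int)) × List (PySem.Set Int)
  | l :: ls, u :: us =>
    if (PySem.Set.inter u supp).isEmpty then
      -- used.intersection(supp) is empty: place here, used.update(supp)
      ((l ++ [supp]) :: ls, PySem.Set.update u supp :: us)
    else
      let r := placeA supp ls us
      (l :: r.1, u :: r.2)
  | ls, us => (ls ++ [[supp]], us ++ [PySem.Set.ofList supp])  -- not placed: new layer

def greedy_layering (supports : List (List Int)) : List (List (List Int)) :=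
  (supports.foldl (fun st supp => placeA supp st.1 st.2) ([], [])).1

-- ===== PORT B =====
-- blocked = union of elem_layers.get(e, set()) for e in supp
def blockedB (el : PySem.Dict Int (PySem.Set Nat)) (supp : List Int) : PySem.Set Nat :=
  supp.foldl (fun acc e => PySem.Set.union acc (el.getD e PySem.Set.empty)) PySem.Set.empty

def stepB (st : List (List (List Int)) × PySem.Dict Int (PySem.Set Nat)) (supp : List Int) :
    List (List (List Int)) × PySem.Dict Int (PySem.Set Nat) :=
  let blocked := blockedB st.2 supp
  -- idx = next(i for i in range(len(layers) + 1) if i not in blocked); always found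
  let idx : Nat := ((List.range (st.1.length + 1)).find?
      (fun i => !(PySem.Set.contains blocked i))).getD st.1.length
  let layers' := if idx = st.1.length then st.1 ++ [[supp]]
                 else st.1.modify idx (fun l => l ++ [supp])
  let el' := supp.foldl
      (fun m e => m.insert e (PySem.Set.add (m.getD e PySem.Set.empty) idx)) st.2
  (layers', el')

def greedy_layering_alt (supports : List (List Int)) : List (List (List Int)) :=
  (supports.foldl stepB ([], PySem.Dict.empty)).1

-- ===== PRECONDITION & SPEC =====
def Spec_greedy_layering (supports : List (List Int)) (out : List (List (List Int))) : Prop := out = greedy_layering_alt supports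
instance (supports : List (List Int)) (out : List (List (List Int))) : Decidable (Spec_greedy_layering supports out) := by unfold Spec_greedy_layering; infer_instance

-- ===== CLAIM (what is proved, stated in full; the proofs are below) =====
def Claim_equal_greedy_layering : Prop := ∀ (supports : List (List Int)), Dom_greedy_layering supports → Spec_greedy_layering supports (greedy_layering supports)

-- ===== LEMMAS AND PROOFS =====

-- invariant tying A's used_sets to B's elem_layers (layers lists are compared directly)
def InvAB (U : List (PySem.Set Int)) (M : PySem.Dict Int (PySem.Set Nat)) : Prop :=
  ∀ (e : Int) (i : Nat), i ∈ M.getD e PySem.Set.empty ↔ ∃ u, U[i]? = some u ∧ e ∈ u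

-- first-fit index of A's inner loop
def ff (supp : List Int) : List (PySem.Set Int) → Nat
  | [] => 0
  | u :: us => if (PySem.Set.inter u supp).isEmpty then 0 else ff supp us + 1

lemma ff_le (supp : List Int) (U : List (PySem.Set Int)) : ff supp U ≤ U.length := by
  induction U with
  | nil => simp [ff]
  | cons u us ih =>
    simp only [ff]
    split_ifs
    · simp
    · simp; omega

lemma inter_isEmpty_iff (u : PySem.Set Int) (supp : List Int) :
    (PySem.Set.inter u supp).isEmpty = true ↔ ∀ e ∈ supp, e ∉ u := by
  rw [List.isEmpty_iff, List.eq_nil_iff_forall_not_mem]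
  constructor
  · intro h e hs hu
    exact h e ((PySem.Set.mem_inter u supp e).2 ⟨hu, by simpa using hs⟩)
  · intro h e he
    rcases (PySem.Set.mem_inter u supp e).1 he with ⟨hu, hs⟩
    exact h e (by simpa using hs) hu

lemma ff_not_blocked (supp : List Int) (U : List (PySem.Set Int)) :
    ¬ ∃ u, U[ff supp U]? = some u ∧ ¬ (PySem.Set.inter u supp).isEmpty := by
  induction U with
  | nil => simp [ff]
  | cons u us ih =>
    simp only [ff]; split_ifs with h
    · rintro ⟨u', hu', hne⟩
      simp only [List.getElem?_cons_zero, Option.some.injEq] at hu'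
      subst hu'
      exact hne h
    · simpa using ih

lemma ff_blocked_lt (supp : List Int) (U : List (PySem.Set Int)) (j : Nat) (hj : j < ff supp U) :
    ∃ u, U[j]? = some u ∧ ¬ (PySem.Set.inter u supp).isEmpty := by
  induction U generalizing j with
  | nil => simp [ff] at hj
  | cons u us ih =>
    simp only [ff] at hj
    split_ifs at hj with h
    · omega
    · cases j with
      | zero => exact ⟨u, by simp, h⟩
      | succ j' => simpa using ih j' (by omega)

-- membership in B's blocked set
lemma mem_blockedB (M : PySem.Dict Int (PySem.Set Nat)) (supp : List Int) (i : Nat) :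
    i ∈ blockedB M supp ↔ ∃ e ∈ supp, i ∈ M.getD e PySem.Set.empty := by
  unfold blockedB
  suffices h : ∀ (acc : PySem.Set Nat),
      i ∈ supp.foldl (fun acc e => PySem.Set.union acc (M.getD e PySem.Set.empty)) acc ↔
        i ∈ acc ∨ ∃ e ∈ supp, i ∈ M.getD e PySem.Set.empty by
    simpa [PySem.Set.empty] using h PySem.Set.empty
  induction supp with
  | nil => simp
  | cons e es ih =>
    intro acc
    simp only [List.foldl_cons, ih, PySem.Set.mem_union, List.mem_cons]
    constructor
    · rintro (⟨h | h⟩ | ⟨e', h1, h2⟩)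
      · exact Or.inl h
      · exact Or.inr ⟨e, Or.inl rfl, h⟩
      · exact Or.inr ⟨e', Or.inr h1, h2⟩
    · rintro (h | ⟨e', (rfl | h1), h2⟩)
      · exact Or.inl (Or.inl h)
      · exact Or.inl (Or.inr h2)
      · exact Or.inr ⟨e', h1, h2⟩

-- find? over List.range picks the least index satisfying the predicate
lemma find?_range_eq_some (p : Nat → Bool) (n k : Nat) (hk : k < n) (hpk : p k = true)
    (hlt : ∀ j < k, p j = false) : (List.range n).find? p = some k := by
  induction k generalizing p n with
  | zero =>
    cases n with
    | zero => omega
    | succ m => rw [List.range_succ_eq_map]; simp [hpk]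
  | succ k' ih =>
    cases n with
    | zero => omega
    | succ m =>
      rw [List.range_succ_eq_map]
      have h0 : p 0 = false := hlt 0 (by omega)
      simp only [List.find?_cons, h0, List.find?_map]
      rw [ih (p ∘ Nat.succ) m (by omega) (by simpa [Function.comp] using hpk)
        (fun j hj => by simpa [Function.comp] using hlt (j + 1) (by omega))]
      rfl

-- B's idx equals A's first-fit index, given the invariant
lemma idx_eq_ff (U : List (PySem.Set Int)) (M : PySem.Dict Int (PySem.Set Nat))
    (supp : List Int) (hInv : InvAB U M) :
    ((List.range (U.length + 1)).find?
        (fun i => !(PySem.Set.contains (blockedB M supp) i))).getD U.length = ff supp U := by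
  have hblocked : ∀ i : Nat, i ∈ blockedB M supp ↔
      ∃ u, U[i]? = some u ∧ ¬ (PySem.Set.inter u supp).isEmpty := by
    intro i
    rw [mem_blockedB]
    constructor
    · rintro ⟨e, he, hi⟩
      rcases (hInv e i).1 hi with ⟨u, hu, heu⟩
      refine ⟨u, hu, ?_⟩
      rw [inter_isEmpty_iff]
      push Not
      exact ⟨e, he, heu⟩
    · rintro ⟨u, hu, hne⟩
      rw [inter_isEmpty_iff] at hne
      push Not at hne
      rcases hne with ⟨e, he, heu⟩
      exact ⟨e, he, (hInv e i).2 ⟨u, hu, heu⟩⟩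
  rw [find?_range_eq_some _ _ (ff supp U) (by have := ff_le supp U; omega)
    (by
      simp only [Bool.not_eq_true', ← Bool.not_eq_true, PySem.Set.contains_iff]
      intro h
      exact ff_not_blocked supp U ((hblocked _).1 h))
    (fun j hj => by
      simp only [Bool.not_eq_false', PySem.Set.contains_iff]
      exact (hblocked j).2 (ff_blocked_lt supp U j hj))]
  rfl

-- A's inner loop in closed form (first-fit at index ff)
lemma placeA_eq (supp : List Int) (L : List (List (List Int))) (U : List (PySem.Set Int))
    (hlen : U.length = L.length) :
    placeA supp L U =
      ((if ff supp U = L.length then L ++ [[supp]]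
        else L.modify (ff supp U) (fun l => l ++ [supp])),
       (if ff supp U = U.length then U ++ [PySem.Set.ofList supp]
        else U.modify (ff supp U) (fun u => PySem.Set.update u supp))) := by
  induction L generalizing U with
  | nil =>
    cases U with
    | nil => simp [placeA, ff]
    | cons u us => simp at hlen
  | cons l ls ih =>
    cases U with
    | nil => simp at hlen
    | cons u us =>
      have hlen' : us.length = ls.length := by simpa using hlen
      by_cases h : (PySem.Set.inter u supp).isEmpty
      · have h0 : ¬ ((0 : Nat) = ls.length + 1) := by omega
        have h0' : ¬ ((0 : Nat) = us.length + 1) := by omega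
        simp [placeA, ff, h]
      · have r := ih us hlen'
        simp only [placeA, ff, if_neg h, r]
        by_cases hc : ff supp us = ls.length
        · simp [hc, hlen']
        · have hcU : ¬ (ff supp us = us.length) := by omega
          simp [hc, hcU]

-- effect of B's elem_layers update on lookups
lemma getD_foldl_insert_add (supp : List Int) (M : PySem.Dict Int (PySem.Set Nat))
    (idx : Nat) (e' : Int) (i : Nat) :
    i ∈ (supp.foldl
        (fun m e => m.insert e (PySem.Set.add (m.getD e PySem.Set.empty) idx)) M).getD e'
        PySem.Set.empty ↔
      i ∈ M.getD e' PySem.Set.empty ∨ (e' ∈ supp ∧ i = idx) := by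
  induction supp generalizing M with
  | nil => simp
  | cons e es ih =>
    simp only [List.foldl_cons, ih, List.mem_cons]
    rw [PySem.Dict.getD_insert]
    by_cases hc : e' = e
    · subst hc
      simp only [if_true, PySem.Set.mem_add, true_or, true_and]
      tauto
    · simp only [if_neg hc]
      tauto

-- one step of the two loops preserves the relationship
lemma step_eq (supp : List Int) (L : List (List (List Int))) (U : List (PySem.Set Int))
    (M : PySem.Dict Int (PySem.Set Nat)) (hlen : U.length = L.length) (hInv : InvAB U M) :
    (placeA supp L U).1 = (stepB (L, M) supp).1 ∧
      (placeA supp L U).2.length = (placeA supp L U).1.length ∧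
      InvAB (placeA supp L U).2 (stepB (L, M) supp).2 := by
  have hidx : ((List.range (L.length + 1)).find?
      (fun i => !(PySem.Set.contains (blockedB M supp) i))).getD L.length = ff supp U := by
    rw [← hlen]; exact idx_eq_ff U M supp hInv
  rw [placeA_eq supp L U hlen]
  unfold stepB
  simp only [hidx]
  refine ⟨?_, ?_, ?_⟩
  · by_cases hc : ff supp U = L.length
    · simp
    · simp
  · by_cases hc : ff supp U = L.length
    · simp [hc, hlen]
    · simp [hc, hlen]
  · intro e i
    rw [getD_foldl_insert_add]
    rw [hInv e i]
    by_cases hc : ff supp U = L.length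
    · simp only [hc, ← hlen, if_true]
      constructor
      · rintro (⟨u, hu, heu⟩ | ⟨hes, rfl⟩)
        · have hlt : i < U.length := by
            rcases List.getElem?_eq_some_iff.1 hu with ⟨h, _⟩
            exact h
          exact ⟨u, by rw [List.getElem?_append_left hlt]; exact hu, heu⟩
        · refine ⟨PySem.Set.ofList supp, ?_, by simpa [PySem.Set.mem_ofList] using hes⟩
          rw [List.getElem?_append_right (le_refl _)]
          simp
      · rintro ⟨u, hu, heu⟩
        rw [List.getElem?_append] at hu
        split_ifs at hu with hlt
        · exact Or.inl ⟨u, hu, heu⟩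
        · have hi : i = U.length := by
            rcases List.getElem?_eq_some_iff.1 hu with ⟨h, _⟩
            simp at h
            omega
          subst hi
          simp only [Nat.sub_self, List.getElem?_cons_zero, Option.some.injEq] at hu
          subst hu
          exact Or.inr ⟨by simpa [PySem.Set.mem_ofList] using heu, rfl⟩
    · have hcU : ¬ ff supp U = U.length := by omega
      rw [if_neg hcU, List.getElem?_modify]
      constructor
      · rintro (⟨u, hu, heu⟩ | ⟨hes, rfl⟩)
        · refine ⟨if ff supp U = i then PySem.Set.update u supp else u, ?_, ?_⟩
          · simp [hu]
          · split_ifs with hfi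
            · simp only [PySem.Set.mem_update]
              exact Or.inl heu
            · exact heu
        · have hffU : ff supp U < U.length := lt_of_le_of_ne (ff_le supp U) hcU
          refine ⟨PySem.Set.update (U[ff supp U]'hffU) supp, ?_, ?_⟩
          · simp [List.getElem?_eq_getElem hffU]
          · simp only [PySem.Set.mem_update]
            exact Or.inr (by simpa using hes)
      · rintro ⟨u, hu, heu⟩
        rcases hopt : U[i]? with _ | u'
        · simp [hopt] at hu
        · simp only [hopt, Option.map_eq_map, Option.map_some, Option.some.injEq] at hu
          by_cases hfi : ff supp U = i
          · rw [if_pos hfi] at hu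
            subst hu
            have heu' : e ∈ u' ∨ e ∈ supp := by
              simpa [PySem.Set.mem_update] using heu
            rcases heu' with h | h
            · exact Or.inl ⟨u', rfl, h⟩
            · exact Or.inr ⟨by simpa using h, hfi.symm⟩
          · rw [if_neg hfi] at hu
            subst hu
            exact Or.inl ⟨u', rfl, heu⟩

-- the whole loops, related state to related state
lemma loop_eq (supports : List (List Int)) :
    ∀ (L : List (List (List Int))) (U : List (PySem.Set Int))
      (M : PySem.Dict Int (PySem.Set Nat)), U.length = L.length → InvAB U M →
      (supports.foldl (fun st supp => placeA supp st.1 st.2) (L, U)).1 =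
        (supports.foldl stepB (L, M)).1 := by
  induction supports with
  | nil => intro L U M _ _; rfl
  | cons supp rest ih =>
    intro L U M hlen hInv
    obtain ⟨h1, h2, h3⟩ := step_eq supp L U M hlen hInv
    simp only [List.foldl_cons]
    have hB : stepB (L, M) supp = ((stepB (L, M) supp).1, (stepB (L, M) supp).2) := rfl
    have hA : placeA supp L U = ((placeA supp L U).1, (placeA supp L U).2) := rfl
    rw [hB, hA, h1]
    exact ih _ _ _ (h1 ▸ h2) h3

-- ===== VERDICT (by name: the statement is the Claim_ definition above) =====
theorem greedy_layering_spec : Claim_equal_greedy_layering := by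
  intro supports _
  unfold Spec_greedy_layering greedy_layering greedy_layering_alt
  exact loop_eq supports [] [] PySem.Dict.empty rfl (by intro e i; simp)
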